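-- pv_equiv track=rewrite | github.com/nawrin15/leetcode-problems | array/1252.Cells_with_Odd_Values_in_a_Matrix.py | oddCells1
-- ===== SOURCE A (Python) =====
-- def oddCells1(m: int, n: int, indices) -> int:
--         rows = [0] * m
--         cols = [0] * n
--
--         for r, c in indices:
--             rows[r] ^= 1
--             cols[c] ^= 1
--
--         odd_rows = sum(rows)
--         odd_cols = sum(cols)
--
--         return odd_rows * n + odd_cols * m - 2 * odd_rows * odd_cols
-- ===== SOURCE B (Python) =====
-- def oddCells1(m: int, n: int, indices) -> int:
--     # Direct simulation: build the m x n grid, perform every row/column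
--     # increment, then count the entries that ended up odd.
--     grid = [[0] * n for _ in range(m)]
--     for r, c in indices:
--         grid[r] = [v + 1 for v in grid[r]]
--         for row in grid:
--             row[c] += 1
--     return sum(1 for row in grid for v in row if v % 2 == 1)
-- ===== Notes on version B (the rewrite author's own statement) =====
-- stated objective: alternative
-- what changed: B builds the actual m x n grid, performs every row and column increment on it, and counts entries with value % 2 == 1 by a flatten-scan, instead of A's two 0/1 parity arrays combined by the inclusion-exclusion formula oddR*n + oddC*m - 2*oddR*oddC; Pre_ excludes only the inputs where A raises (non-pair elements or out-of-range indices), where B raises too.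
import Mathlib
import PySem

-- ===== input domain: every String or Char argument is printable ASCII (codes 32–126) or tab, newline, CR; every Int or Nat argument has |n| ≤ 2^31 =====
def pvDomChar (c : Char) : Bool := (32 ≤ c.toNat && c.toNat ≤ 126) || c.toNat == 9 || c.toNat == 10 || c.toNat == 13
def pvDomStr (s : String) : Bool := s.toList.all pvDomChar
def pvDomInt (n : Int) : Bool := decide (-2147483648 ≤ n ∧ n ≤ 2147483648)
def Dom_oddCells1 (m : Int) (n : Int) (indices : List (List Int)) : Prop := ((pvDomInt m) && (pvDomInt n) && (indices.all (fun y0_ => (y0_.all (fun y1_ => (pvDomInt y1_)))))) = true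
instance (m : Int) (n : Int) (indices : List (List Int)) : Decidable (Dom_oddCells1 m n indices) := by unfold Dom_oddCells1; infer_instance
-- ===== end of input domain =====

-- B simulates the whole m×n grid (increment full rows/columns, then count odd
-- entries) instead of A's parity arrays and inclusion–exclusion formula
-- (objective: alternative; B is the direct simulation, not faster).

-- ===== PORT A =====
-- body of A's 'for r, c in indices' loop
def oddCells1Step (st : List Int × List Int) (p : List Int) : List Int × List Int :=
  match p with
  | [r, c] =>
      (PySem.List.pySetD st.1 r (PySem.Int.bxor (PySem.List.pyGetD st.1 r 0) 1),
       PySem.List.pySetD st.2 c (PySem.Int.bxor (PySem.List.pyGetD st.2 c 0) 1))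
  | _ => st

def oddCells1 (m : Int) (n : Int) (indices : List (List Int)) : Int :=
  let rows : List Int := List.replicate m.toNat 0
  let cols : List Int := List.replicate n.toNat 0
  let st := indices.foldl oddCells1Step (rows, cols)
  let oddRows := st.1.sum
  let oddCols := st.2.sum
  oddRows * n + oddCols * m - 2 * oddRows * oddCols

-- ===== PORT B =====
-- body of B's loop: replace row r by its +1 image, then bump entry c of every row
def oddCells1AltStep (st : List (List Int)) (p : List Int) : List (List Int) :=
  match p with
  | [r, c] =>
      let g1 := PySem.List.pySetD st r ((PySem.List.pyGetD st r []).map (fun v => v + 1))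
      g1.map (fun row => PySem.List.pySetD row c (PySem.List.pyGetD row c 0 + 1))
  | _ => st

def oddCells1_alt (m : Int) (n : Int) (indices : List (List Int)) : Int :=
  let grid : List (List Int) := (List.range m.toNat).map (fun _ => List.replicate n.toNat 0)
  let g := indices.foldl oddCells1AltStep grid
  ((g.flatMap (fun row => row)).countP (fun v => PySem.Int.mod v 2 == 1) : Int)

-- ===== PRECONDITION & SPEC =====
-- Pre_ excludes exactly the inputs on which A raises: an element of indices that
-- is not a pair (ValueError on unpacking) or whose row/column index is out of
-- range for the length-m/length-n arrays (IndexError); B raises there too.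
def Pre_oddCells1 (m : Int) (n : Int) (indices : List (List Int)) : Prop :=
  ∀ p ∈ indices, p.length = 2 ∧
    -m ≤ p.headD 0 ∧ p.headD 0 < m ∧ -n ≤ p.getD 1 0 ∧ p.getD 1 0 < n
instance (m : Int) (n : Int) (indices : List (List Int)) : Decidable (Pre_oddCells1 m n indices) := by unfold Pre_oddCells1; infer_instance

def pvWitness_oddCells1 : Int × Int × List (List Int) := (2, 3, [[0, 1], [1, 1], [-1, -2]])

def Spec_oddCells1 (m : Int) (n : Int) (indices : List (List Int)) (out : Int) : Prop := out = oddCells1_alt m n indices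
instance (m : Int) (n : Int) (indices : List (List Int)) (out : Int) : Decidable (Spec_oddCells1 m n indices out) := by unfold Spec_oddCells1; infer_instance

-- ===== CLAIM (what is proved, stated in full; the proofs are below) =====
def Claim_equal_oddCells1 : Prop := ∀ (m : Int) (n : Int) (indices : List (List Int)), Dom_oddCells1 m n indices → Pre_oddCells1 m n indices → Spec_oddCells1 m n indices (oddCells1 m n indices)

-- ===== LEMMAS AND PROOFS =====

-- parity of an increment count, odd-test, outer-sum grid, wrapped index
def par (x : Int) : Int := x % 2
def oddb (v : Int) : Bool := v % 2 == 1
def mkGrid (rc cc : List Int) : List (List Int) := rc.map (fun a => cc.map (fun b => a + b))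
def wIdx (L : Nat) (r : Int) : Nat := if 0 ≤ r then r.toNat else L - (-r).toNat

-- resolution of a possibly-negative in-range Python index
theorem pyIdx_inrange (n : Nat) (i : Int) (h1 : -(n : Int) ≤ i) (h2 : i < n) :
    PySem.List.pyIdx? n i = some (if 0 ≤ i then i.toNat else n - (-i).toNat) := by
  simp only [PySem.List.pyIdx?]
  split_ifs <;> simp_all

theorem pySetD_inrange {α : Type} (xs : List α) (i : Int) (v : α)
    (h1 : -(xs.length : Int) ≤ i) (h2 : i < xs.length) :
    PySem.List.pySetD xs i v = xs.set (wIdx xs.length i) v := by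
  simp [PySem.List.pySetD, PySem.List.pySet?, pyIdx_inrange _ _ h1 h2, wIdx]

theorem pyGetD_inrange {α : Type} (xs : List α) (i : Int) (d : α)
    (h1 : -(xs.length : Int) ≤ i) (h2 : i < xs.length) :
    PySem.List.pyGetD xs i d = xs.getD (wIdx xs.length i) d := by
  by_cases h0 : 0 ≤ i
  · rw [wIdx, if_pos h0, PySem.List.pyGetD_eq_getElem xs d h0 h2,
      List.getD_eq_getElem _ _ (by omega)]
  · have hL : PySem.List.pyGetD xs i d = xs[xs.length - (-i).toNat]'(by omega) := by
      conv_lhs => rw [show i = -(((-i).toNat : Int)) by omega]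
      exact PySem.List.pyGetD_neg_natCast xs (-i).toNat d (by omega) (by omega)
    rw [wIdx, if_neg h0, hL, List.getD_eq_getElem _ _ (by omega)]

theorem bxor_par (x : Int) : PySem.Int.bxor (par x) 1 = par (x + 1) := by
  unfold par
  rcases Int.emod_two_eq x with h | h
  · have h1 : (x + 1) % 2 = 1 := by omega
    rw [h, h1]; decide
  · have h1 : (x + 1) % 2 = 0 := by omega
    rw [h, h1]; decide

-- one A-side parity-array update is the parity image of one count bump
theorem stepA_eq (m r : Int) (rc : List Int) (hL : rc.length = m.toNat)
    (h1 : -m ≤ r) (h2 : r < m) :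
    PySem.List.pySetD (rc.map par) r
      (PySem.Int.bxor (PySem.List.pyGetD (rc.map par) r 0) 1)
    = (rc.set (wIdx rc.length r) (rc.getD (wIdx rc.length r) 0 + 1)).map par := by
  have hm : 0 < m := by omega
  have hw : wIdx rc.length r < rc.length := by unfold wIdx; split_ifs <;> omega
  have hlen : (rc.map par).length = rc.length := by simp
  have hmem1 : -((rc.map par).length : Int) ≤ r := by rw [hlen]; omega
  have hmem2 : r < (rc.map par).length := by rw [hlen]; omega
  have hwmap : wIdx (rc.map par).length r = wIdx rc.length r := by rw [hlen]
  rw [pyGetD_inrange _ _ _ hmem1 hmem2, pySetD_inrange _ _ _ hmem1 hmem2, hwmap]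
  have hget : (rc.map par).getD (wIdx rc.length r) 0 = par (rc.getD (wIdx rc.length r) 0) := by
    rw [List.getD_eq_getElem _ _ (by rw [hlen]; exact hw),
        List.getD_eq_getElem _ _ hw]
    simp
  rw [hget, bxor_par, ← List.map_set]

-- bump entry c of the row "a + cc"
theorem colBump (n c a : Int) (cc : List Int) (hn : cc.length = n.toNat)
    (hc1 : -n ≤ c) (hc2 : c < n) :
    PySem.List.pySetD (cc.map (fun b => a + b)) c
      (PySem.List.pyGetD (cc.map (fun b => a + b)) c 0 + 1)
    = (cc.set (wIdx cc.length c) (cc.getD (wIdx cc.length c) 0 + 1)).map (fun b => a + b) := by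
  have hnn : 0 < n := by omega
  have hw : wIdx cc.length c < cc.length := by unfold wIdx; split_ifs <;> omega
  have hlen : (cc.map (fun b => a + b)).length = cc.length := by simp
  have hm1 : -((cc.map (fun b => a + b)).length : Int) ≤ c := by rw [hlen]; omega
  have hm2 : c < (cc.map (fun b => a + b)).length := by rw [hlen]; omega
  have hwmap : wIdx (cc.map (fun b => a + b)).length c = wIdx cc.length c := by rw [hlen]
  rw [pyGetD_inrange _ _ _ hm1 hm2, pySetD_inrange _ _ _ hm1 hm2, hwmap]
  have hget : (cc.map (fun b => a + b)).getD (wIdx cc.length c) 0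
      = a + cc.getD (wIdx cc.length c) 0 := by
    rw [List.getD_eq_getElem _ _ (by rw [hlen]; exact hw),
        List.getD_eq_getElem _ _ hw]
    simp
  rw [hget, List.map_set]
  congr 1
  ring

-- one B-side grid step equals bumping both count lists
theorem stepB_eq (m n r c : Int) (rc cc : List Int)
    (hm : rc.length = m.toNat) (hn : cc.length = n.toNat)
    (hr1 : -m ≤ r) (hr2 : r < m) (hc1 : -n ≤ c) (hc2 : c < n) :
    oddCells1AltStep (mkGrid rc cc) [r, c]
    = mkGrid (rc.set (wIdx rc.length r) (rc.getD (wIdx rc.length r) 0 + 1))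
             (cc.set (wIdx cc.length c) (cc.getD (wIdx cc.length c) 0 + 1)) := by
  have hmm : 0 < m := by omega
  have hw : wIdx rc.length r < rc.length := by unfold wIdx; split_ifs <;> omega
  have hlen : (mkGrid rc cc).length = rc.length := by simp [mkGrid]
  have hm1 : -((mkGrid rc cc).length : Int) ≤ r := by rw [hlen]; omega
  have hm2 : r < (mkGrid rc cc).length := by rw [hlen]; omega
  have hwmap : wIdx (mkGrid rc cc).length r = wIdx rc.length r := by rw [hlen]
  show (PySem.List.pySetD (mkGrid rc cc) r
      ((PySem.List.pyGetD (mkGrid rc cc) r []).map (fun v => v + 1))).map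
        (fun row => PySem.List.pySetD row c (PySem.List.pyGetD row c 0 + 1)) = _
  rw [pyGetD_inrange _ _ _ hm1 hm2, pySetD_inrange _ _ _ hm1 hm2, hwmap]
  have hrow : (mkGrid rc cc).getD (wIdx rc.length r) []
      = cc.map (fun b => rc.getD (wIdx rc.length r) 0 + b) := by
    rw [List.getD_eq_getElem _ _ (by rw [hlen]; exact hw)]
    simp only [mkGrid, List.getElem_map]
    rw [List.getD_eq_getElem _ _ hw]
  rw [hrow, List.map_map]
  have hplus : (cc.map ((fun v => v + 1) ∘ fun b => rc.getD (wIdx rc.length r) 0 + b))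
      = cc.map (fun b => (rc.getD (wIdx rc.length r) 0 + 1) + b) := by
    apply List.map_congr_left; intro b _; simp [Function.comp]; ring
  rw [hplus]
  have hg1 : ((mkGrid rc cc).set (wIdx rc.length r)
        (cc.map (fun b => (rc.getD (wIdx rc.length r) 0 + 1) + b)))
      = mkGrid (rc.set (wIdx rc.length r) (rc.getD (wIdx rc.length r) 0 + 1)) cc := by
    unfold mkGrid
    rw [List.map_set]
  rw [hg1]
  unfold mkGrid
  rw [List.map_map]
  apply List.map_congr_left
  intro a _
  simp only [Function.comp]
  exact colBump n c a cc hn hc1 hc2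

-- the two loops run in lock-step over the same pair of count lists
theorem loop_inv (m n : Int) (ind : List (List Int)) :
    ∀ (rc cc : List Int),
    (∀ p ∈ ind, p.length = 2 ∧ -m ≤ p.headD 0 ∧ p.headD 0 < m ∧ -n ≤ p.getD 1 0 ∧ p.getD 1 0 < n) →
    rc.length = m.toNat → cc.length = n.toNat →
    ∃ rc' cc', rc'.length = m.toNat ∧ cc'.length = n.toNat ∧
      ind.foldl oddCells1Step (rc.map par, cc.map par) = (rc'.map par, cc'.map par) ∧
      ind.foldl oddCells1AltStep (mkGrid rc cc) = mkGrid rc' cc' := by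
  induction ind with
  | nil => intro rc cc _ h1 h2; exact ⟨rc, cc, h1, h2, rfl, rfl⟩
  | cons p ind ih =>
      intro rc cc hPre h1 h2
      obtain ⟨hlen, hr1, hr2, hc1, hc2⟩ := hPre p (by simp)
      obtain ⟨r, c, rfl⟩ : ∃ r c, p = [r, c] := by
        match p, hlen with
        | [r, c], _ => exact ⟨r, c, rfl⟩
      simp only [List.headD_cons] at hr1 hr2
      have hc1' : -n ≤ c := by simpa using hc1
      have hc2' : c < n := by simpa using hc2
      simp only [List.foldl_cons]
      have hstepA : oddCells1Step (rc.map par, cc.map par) [r, c]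
          = ((rc.set (wIdx rc.length r) (rc.getD (wIdx rc.length r) 0 + 1)).map par,
             (cc.set (wIdx cc.length c) (cc.getD (wIdx cc.length c) 0 + 1)).map par) := by
        unfold oddCells1Step
        simp only
        rw [stepA_eq m r rc h1 hr1 hr2, stepA_eq n c cc h2 hc1' hc2']
      rw [hstepA, stepB_eq m n r c rc cc h1 h2 hr1 hr2 hc1' hc2']
      exact ih _ _ (fun q hq => hPre q (by simp [hq]))
        (by rw [List.length_set]; exact h1) (by rw [List.length_set]; exact h2)

theorem oddb_add (a b : Int) :
    oddb (a + b) = true ↔ ((oddb a = true) ↔ ¬ (oddb b = true)) := by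
  unfold oddb
  rcases Int.emod_two_eq a with ha | ha <;> rcases Int.emod_two_eq b with hb | hb <;>
    [skip; skip; skip; skip] <;>
    (first
      | (have h : (a + b) % 2 = 0 := by omega
         simp [ha, hb, h])
      | (have h : (a + b) % 2 = 1 := by omega
         simp [ha, hb, h]))

theorem countP_map_add (a : Int) (cc : List Int) :
    (cc.map (fun b => a + b)).countP oddb
    = if oddb a then cc.length - cc.countP oddb else cc.countP oddb := by
  induction cc with
  | nil => simp
  | cons b cc ih =>
      have hle : List.countP oddb cc ≤ cc.length := List.countP_le_length
      have hab := oddb_add a b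
      by_cases hA : oddb a = true <;> by_cases hB : oddb b = true
      · have h : oddb (a + b) = false := by
          rw [Bool.eq_false_iff]; intro hh; have := hab.1 hh; simp [hA, hB] at this
        simp [ih, hA, hB, h]
      · have h : oddb (a + b) = true := hab.2 (by simp [hA, hB])
        simp [ih, hA, hB, h]; omega
      · have h : oddb (a + b) = true := hab.2 (by simp [hA, hB])
        simp [ih, hA, hB, h]
      · have h : oddb (a + b) = false := by
          rw [Bool.eq_false_iff]; intro hh; have := hab.1 hh; simp [hA, hB] at this
        simp [ih, hA, hB, h]

theorem count_mkGrid (rc cc : List Int) :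
    ((mkGrid rc cc).flatMap (fun row => row)).countP oddb
    = rc.countP oddb * (cc.length - cc.countP oddb)
      + (rc.length - rc.countP oddb) * cc.countP oddb := by
  induction rc with
  | nil => simp [mkGrid]
  | cons a rc ih =>
      have hle : List.countP oddb rc ≤ rc.length := List.countP_le_length
      have hle' : List.countP oddb cc ≤ cc.length := List.countP_le_length
      simp only [mkGrid, List.map_cons, List.flatMap_cons, List.countP_append] at ih ⊢
      rw [ih, countP_map_add]
      simp only [List.countP_cons, List.length_cons]
      by_cases hA : oddb a = true
      · simp only [hA, if_true]
        have h1 : rc.length + 1 - (List.countP oddb rc + 1)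
            = rc.length - List.countP oddb rc := by omega
        rw [h1, Nat.succ_mul]
        ring
      · simp only [hA, Bool.false_eq_true, if_false, Nat.add_zero]
        have h1 : rc.length + 1 - List.countP oddb rc
            = (rc.length - List.countP oddb rc) + 1 := by omega
        rw [h1, Nat.succ_mul]
        ring

theorem sum_map_par (l : List Int) : (l.map par).sum = (l.countP oddb : Int) := by
  induction l with
  | nil => simp
  | cons a l ih =>
      simp only [List.map_cons, List.sum_cons, List.countP_cons, ih]
      rcases Int.emod_two_eq a with h | h
      · have hb : oddb a = false := by simp [oddb, h]
        simp [par, h, hb]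
      · have hb : oddb a = true := by simp [oddb, h]
        simp [par, h, hb]
        omega

theorem par_zero_replicate (k : Nat) :
    (List.replicate k (0 : Int)).map par = List.replicate k (0 : Int) := by
  rw [List.map_replicate]; rfl

theorem mkGrid_zero (k j : Nat) :
    mkGrid (List.replicate k (0 : Int)) (List.replicate j (0 : Int))
    = (List.range k).map (fun _ => List.replicate j (0 : Int)) := by
  unfold mkGrid
  rw [List.map_replicate, List.map_const', List.length_range]
  simp

theorem pred_eq_oddb : (fun v : Int => PySem.Int.mod v 2 == 1) = oddb := by
  funext v
  rw [PySem.Int.mod_eq_emod_of_pos (by norm_num)]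
  rfl

-- ===== VERDICT (by name: the statement is the Claim_ definition above) =====
theorem oddCells1_spec : Claim_equal_oddCells1 := by
  intro m n indices _ hPre
  unfold Spec_oddCells1 oddCells1 oddCells1_alt
  simp only
  obtain ⟨rc', cc', hL1, hL2, hA, hB⟩ :=
    loop_inv m n indices (List.replicate m.toNat 0) (List.replicate n.toNat 0) hPre
      (by simp) (by simp)
  have hinitA : ((List.replicate m.toNat (0:Int)), (List.replicate n.toNat (0:Int)))
      = ((List.replicate m.toNat (0:Int)).map par, (List.replicate n.toNat (0:Int)).map par) := by
    rw [par_zero_replicate, par_zero_replicate]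
  have hinitB : (List.range m.toNat).map (fun _ => List.replicate n.toNat (0:Int))
      = mkGrid (List.replicate m.toNat 0) (List.replicate n.toNat 0) := (mkGrid_zero _ _).symm
  rw [pred_eq_oddb, hinitB, hinitA, hA, hB]
  simp only
  rw [sum_map_par, sum_map_par, count_mkGrid, hL1, hL2]
  have hR : List.countP oddb rc' ≤ m.toNat := by
    have : List.countP oddb rc' ≤ rc'.length := List.countP_le_length
    omega
  have hC : List.countP oddb cc' ≤ n.toNat := by
    have : List.countP oddb cc' ≤ cc'.length := List.countP_le_length
    omega
  rcases indices with _ | ⟨p, rest⟩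
  · -- empty indices: both loops were identities, rc'/cc' came from the replicate inits
    have h := hA
    simp only [List.foldl_nil, Prod.mk.injEq] at h
    obtain ⟨h1, h2⟩ := h
    have hr : rc'.map par = List.replicate m.toNat 0 := by
      rw [← h1, par_zero_replicate]
    have hc : cc'.map par = List.replicate n.toNat 0 := by
      rw [← h2, par_zero_replicate]
    have hR0 : List.countP oddb rc' = 0 := by
      have h3 := sum_map_par rc'
      rw [hr, List.sum_replicate, smul_zero] at h3
      omega
    have hC0 : List.countP oddb cc' = 0 := by
      have h3 := sum_map_par cc'
      rw [hc, List.sum_replicate, smul_zero] at h3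
      omega
    simp [hR0, hC0]
  · -- nonempty: the first pair forces 0 < m and 0 < n
    obtain ⟨_, hr1, hr2, hc1, hc2⟩ := hPre p (by simp)
    have hm : 0 < m := by omega
    have hn : 0 < n := by omega
    push_cast [Nat.cast_sub hR, Nat.cast_sub hC]
    rw [Int.toNat_of_nonneg (by omega), Int.toNat_of_nonneg (by omega)]
    ring
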